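-- pv_equiv track=rewrite | github.com/gobii-ai/gobii-platform | api/agent/tools/sqlite_autocorrect.py | _find_top_level_keyword
-- ===== SOURCE A (Python) =====
-- def _find_top_level_keyword(cleaned: str, keyword: str, start: int) -> int | None:
--     keyword_upper = keyword.upper()
--     length = len(cleaned)
--     idx = start
--     depth = 0
--
--     while idx < length:
--         ch = cleaned[idx]
--         if ch == "(":
--             depth += 1
--         elif ch == ")" and depth > 0:
--             depth -= 1
--
--         if depth == 0 and cleaned[idx : idx + len(keyword_upper)].upper() == keyword_upper:
--             before = cleaned[idx - 1] if idx > 0 else " "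
--             after_idx = idx + len(keyword_upper)
--             after = cleaned[after_idx] if after_idx < length else " "
--             if not _is_identifier_char(before) and not _is_identifier_char(after):
--                 return idx
--
--         idx += 1
--
--     return None
--
-- def _is_identifier_char(char: str) -> bool:
--     return char.isalnum() or char == "_"
-- ===== SOURCE B (Python) =====
-- def _is_identifier_char(char: str) -> bool:
--     return char.isalnum() or char == "_"
--
--
-- def _find_top_level_keyword(cleaned: str, keyword: str, start: int) -> int | None:
--     # Jump between candidate occurrences with str.find on an uppercased copy,
--     # advancing the paren-depth cursor only over the skipped characters.
--     upper = cleaned.upper()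
--     kw = keyword.upper()
--     n = len(cleaned)
--     k = len(kw)
--     pos = start
--     cur = start
--     depth = 0
--     while True:
--         idx = upper.find(kw, pos)
--         if idx < 0 or idx >= n:
--             return None
--         while cur <= idx:
--             ch = cleaned[cur]
--             if ch == "(":
--                 depth += 1
--             elif ch == ")" and depth > 0:
--                 depth -= 1
--             cur += 1
--         if depth == 0:
--             before = cleaned[idx - 1] if idx > 0 else " "
--             after = cleaned[idx + k] if idx + k < n else " "
--             if not _is_identifier_char(before) and not _is_identifier_char(after):
--                 return idx
--         pos = idx + 1
-- ===== Notes on version B (the rewrite author's own statement) =====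
-- stated objective: faster
-- what changed: Instead of testing an uppercased slice against the keyword at every single index, B uppercases the string once and jumps straight between candidate occurrences with str.find, advancing the paren-depth cursor only once over each skipped character.
-- outside the precondition, e.g. on _find_top_level_keyword('b a', 'B', -3): A returns -3, B returns 0; on _find_top_level_keyword('abc', 'd', -10): A raises IndexError, B returns None
import Mathlib
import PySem

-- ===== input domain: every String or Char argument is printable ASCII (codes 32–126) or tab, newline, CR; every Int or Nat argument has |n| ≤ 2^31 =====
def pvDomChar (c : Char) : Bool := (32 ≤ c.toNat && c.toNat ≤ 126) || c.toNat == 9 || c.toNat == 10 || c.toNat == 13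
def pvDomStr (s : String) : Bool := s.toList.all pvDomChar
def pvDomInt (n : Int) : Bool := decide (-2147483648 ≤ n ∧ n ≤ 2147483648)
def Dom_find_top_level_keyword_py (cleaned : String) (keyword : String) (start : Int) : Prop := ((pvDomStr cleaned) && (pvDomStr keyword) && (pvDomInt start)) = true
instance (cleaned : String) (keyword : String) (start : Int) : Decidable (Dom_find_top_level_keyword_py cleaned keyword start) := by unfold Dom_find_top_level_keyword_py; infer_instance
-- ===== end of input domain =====

-- B replaces A's per-index slice-and-uppercase test by a single uppercased copy and str.find
-- jumps between candidate occurrences (objective: faster by a constant-factor mechanism).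

-- ===== PORT A =====
-- port of _is_identifier_char (A's module helper)
def pvIsIdentifierChar (c : Char) : Bool := PySem.Chars.isalnum c || c == '_'

-- the while-loop of A; fuel = remaining iterations (the wrapper passes enough for idx to reach length)
def pvFindLoop (cs kwU : List Char) : Nat → Int → Int → Option Int
  | 0, _, _ => none
  | fuel + 1, idx, depth =>
    if idx < (cs.length : Int) then
      let ch := PySem.List.pyGetD cs idx ' '
      let depth1 := if ch == '(' then depth + 1
                    else if ch == ')' && decide (0 < depth) then depth - 1 else depth
      if depth1 == 0 &&
         (PySem.Chars.upper (PySem.List.slice cs (some idx) (some (idx + (kwU.length : Int)))) == kwU) then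
        let before := if 0 < idx then PySem.List.pyGetD cs (idx - 1) ' ' else ' '
        let afterIdx := idx + (kwU.length : Int)
        let after := if afterIdx < (cs.length : Int) then PySem.List.pyGetD cs afterIdx ' ' else ' '
        if !pvIsIdentifierChar before && !pvIsIdentifierChar after then some idx
        else pvFindLoop cs kwU fuel (idx + 1) depth1
      else pvFindLoop cs kwU fuel (idx + 1) depth1
    else none

def find_top_level_keyword_py (cleaned : String) (keyword : String) (start : Int) : Option Int :=
  pvFindLoop cleaned.toList (PySem.Chars.upper keyword.toList)
    (((cleaned.toList.length : Int) - start).toNat + 1) start 0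

-- ===== PORT B =====
-- port of B's helper _is_identifier_char
def pvIdentB (c : Char) : Bool := PySem.Chars.isalnum c || c == '_'

-- B's inner while: advance the depth cursor from cur through stop inclusive
def pvAdvanceDepth (cs : List Char) : Nat → Int → Int → Int → Int × Int
  | 0, cur, _, depth => (cur, depth)
  | fuel + 1, cur, stop, depth =>
    if cur ≤ stop then
      let ch := PySem.List.pyGetD cs cur ' '
      let depth1 := if ch == '(' then depth + 1
                    else if ch == ')' && decide (0 < depth) then depth - 1 else depth
      pvAdvanceDepth cs fuel (cur + 1) stop depth1
    else (cur, depth)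

-- B's outer while True loop over find-candidates
def pvScanLoop (cs us kwU : List Char) (k : Int) : Nat → Int → Int → Int → Option Int
  | 0, _, _, _ => none
  | fuel + 1, pos, cur, depth =>
    let idx := PySem.Chars.findFrom us kwU pos none
    if idx < 0 || (cs.length : Int) ≤ idx then none
    else
      let st := pvAdvanceDepth cs (idx + 1 - cur).toNat cur idx depth
      if st.2 == 0 then
        let before := if 0 < idx then PySem.List.pyGetD cs (idx - 1) ' ' else ' '
        let after := if idx + k < (cs.length : Int) then PySem.List.pyGetD cs (idx + k) ' ' else ' '
        if !pvIdentB before && !pvIdentB after then some idx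
        else pvScanLoop cs us kwU k fuel (idx + 1) st.1 st.2
      else pvScanLoop cs us kwU k fuel (idx + 1) st.1 st.2

def find_top_level_keyword_py_alt (cleaned : String) (keyword : String) (start : Int) : Option Int :=
  pvScanLoop cleaned.toList (PySem.Chars.upper cleaned.toList) (PySem.Chars.upper keyword.toList)
    ((PySem.Chars.upper keyword.toList).length : Int)
    (((cleaned.toList.length : Int) + 1 - start).toNat + 1) start start 0

-- ===== PRECONDITION & SPEC =====
-- Pre_ excludes negative start: there A indexes cleaned[idx] with a negative idx, so it either
-- raises IndexError (start < -len(cleaned), cleaned nonempty) or scans via Python's accidental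
-- negative-index wraparound and can return a negative position; B clamps like str.find does.
def Pre_find_top_level_keyword_py (cleaned : String) (keyword : String) (start : Int) : Prop := 0 ≤ start
instance (cleaned : String) (keyword : String) (start : Int) : Decidable (Pre_find_top_level_keyword_py cleaned keyword start) := by unfold Pre_find_top_level_keyword_py; infer_instance

def pvWitness_find_top_level_keyword_py : String × String × Int := ("(a) WHERE b", "where", 0)

def Spec_find_top_level_keyword_py (cleaned : String) (keyword : String) (start : Int) (out : Option Int) : Prop := out = find_top_level_keyword_py_alt cleaned keyword start
instance (cleaned : String) (keyword : String) (start : Int) (out : Option Int) : Decidable (Spec_find_top_level_keyword_py cleaned keyword start out) := by unfold Spec_find_top_level_keyword_py; infer_instance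

-- ===== CLAIM (what is proved, stated in full; the proofs are below) =====
def Claim_equal_find_top_level_keyword_py : Prop := ∀ (cleaned : String) (keyword : String) (start : Int), Dom_find_top_level_keyword_py cleaned keyword start → Pre_find_top_level_keyword_py cleaned keyword start → Spec_find_top_level_keyword_py cleaned keyword start (find_top_level_keyword_py cleaned keyword start)

-- ===== LEMMAS AND PROOFS =====

-- the depth update both loops perform on one character
def pvBump (ch : Char) (d : Int) : Int :=
  if ch == '(' then d + 1 else if ch == ')' && decide (0 < d) then d - 1 else d

-- depth after processing characters j..m-1 starting from d
def pvScanD (cs : List Char) (j m : Nat) (d : Int) : Int :=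
  ((cs.drop j).take (m - j)).foldl (fun d ch => pvBump ch d) d

lemma pvScanD_self (cs : List Char) (j : Nat) (d : Int) : pvScanD cs j j d = d := by
  simp [pvScanD]

lemma pvScanD_cons (cs : List Char) {j m : Nat} (d : Int) (hj : j < cs.length) (h : j < m) :
    pvScanD cs j m d = pvScanD cs (j+1) m (pvBump (cs.getD j ' ') d) := by
  unfold pvScanD
  rw [List.drop_eq_getElem_cons hj, List.getD_eq_getElem cs ' ' hj,
      show m - j = (m - (j+1)) + 1 by omega, List.take_succ_cons, List.foldl_cons]

lemma pvScanD_snoc (cs : List Char) {j m : Nat} (d : Int) (hm : m < cs.length) (h : j ≤ m) :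
    pvScanD cs j (m+1) d = pvBump (cs.getD m ' ') (pvScanD cs j m d) := by
  unfold pvScanD
  rw [show m + 1 - j = (m - j) + 1 by omega, List.take_add_one]
  have hlt : m - j < (cs.drop j).length := by rw [List.length_drop]; omega
  have : (cs.drop j)[m - j]? = some (cs.getD m ' ') := by
    rw [List.getElem?_drop, List.getD_eq_getElem cs ' ' hm,
        show j + (m - j) = m by omega, List.getElem?_eq_getElem hm]
  rw [this]
  simp [List.foldl_append]

-- A's match test at a nonnegative index, phrased as prefix of the uppercased string
lemma pvTest_iff (cs kwU : List Char) (j : Nat) :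
    ((PySem.Chars.upper (PySem.List.slice cs (some (j:Int)) (some ((j:Int) + (kwU.length : Int)))) == kwU) = true)
      ↔ kwU <+: (PySem.Chars.upper cs).drop j := by
  rw [beq_iff_eq, PySem.List.slice_natCast_add]
  have hu : PySem.Chars.upper ((cs.drop j).take kwU.length)
      = ((PySem.Chars.upper cs).drop j).take kwU.length := by
    simp [PySem.Chars.upper]
  rw [hu]
  constructor
  · intro h; rw [← h]; exact List.take_prefix _ _
  · intro h; exact (List.prefix_iff_eq_take.mp h).symm

lemma pvNotOcc (us kwU : List Char) {p i : Nat} (h : ¬ kwU <:+: us.drop p) (hpi : p ≤ i) :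
    ¬ kwU <+: us.drop i := by
  intro hpre
  apply h
  have : us.drop i = (us.drop p).drop (i - p) := by
    rw [List.drop_drop]; congr 1; omega
  rw [this] at hpre
  exact hpre.isInfix.trans (List.drop_suffix _ _).isInfix

-- A returns none when no occurrence of the keyword exists at or beyond idx
lemma pvFindLoop_none (cs kwU : List Char) :
    ∀ f : Nat, ∀ idx d : Int, 0 ≤ idx →
      (∀ i : Nat, idx ≤ (i : Int) → i < cs.length → ¬ kwU <+: (PySem.Chars.upper cs).drop i) →
      pvFindLoop cs kwU f idx d = none := by
  intro f
  induction f with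
  | zero => intro idx d _ _; rfl
  | succ f ih =>
    intro idx d h0 h
    lift idx to ℕ using h0 with i
    by_cases hlt : (i : Int) < (cs.length : Int)
    · have hi : i < cs.length := by exact_mod_cast hlt
      have ht : ((PySem.Chars.upper (PySem.List.slice cs (some (i:Int)) (some ((i:Int) + (kwU.length : Int)))) == kwU)) = false := by
        rw [Bool.eq_false_iff, ne_eq, pvTest_iff]
        exact h i le_rfl hi
      have hrec : ∀ d' : Int, pvFindLoop cs kwU f ((i:Int) + 1) d' = none :=
        fun d' => ih ((i:Int)+1) d' (by omega) (fun i' hi' hlen => h i' (by omega) hlen)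
      simp only [pvFindLoop, if_pos hlt, ht, Bool.and_false, Bool.false_eq_true, if_false, hrec]
    · simp only [pvFindLoop, if_neg hlt]

-- A's loop skips (updating only depth) over a stretch with no occurrence
lemma pvFindLoop_skip (cs kwU : List Char) (m : Nat) (hm : m ≤ cs.length) :
    ∀ k j : Nat, ∀ d : Int, j + k = m →
      (∀ i : Nat, j ≤ i → i < m → ¬ kwU <+: (PySem.Chars.upper cs).drop i) →
      pvFindLoop cs kwU (cs.length - j + 1) (j : Int) d
        = pvFindLoop cs kwU (cs.length - m + 1) (m : Int) (pvScanD cs j m d) := by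
  intro k
  induction k with
  | zero =>
    intro j d hjk h
    have : j = m := by omega
    subst this
    rw [pvScanD_self]
  | succ k ih =>
    intro j d hjk h
    have hjm : j < m := by omega
    have hjlen : j < cs.length := by omega
    have hlt : (j : Int) < (cs.length : Int) := by exact_mod_cast hjlen
    have ht : ((PySem.Chars.upper (PySem.List.slice cs (some (j:Int)) (some ((j:Int) + (kwU.length : Int)))) == kwU)) = false := by
      rw [Bool.eq_false_iff, ne_eq, pvTest_iff]
      exact h j le_rfl hjm
    have hfuel : cs.length - j + 1 = (cs.length - (j+1) + 1) + 1 := by omega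
    rw [hfuel]
    have hget : PySem.List.pyGetD cs (j : Int) ' ' = cs.getD j ' ' := by
      simp [PySem.List.pyGetD_natCast]
    conv_lhs => rw [pvFindLoop]
    simp only [if_pos hlt, ht, Bool.and_false, Bool.false_eq_true, if_false, hget]
    have hcast : (j : Int) + 1 = ((j + 1 : Nat) : Int) := by push_cast; ring
    rw [show (if cs.getD j ' ' == '(' then d + 1 else if cs.getD j ' ' == ')' && decide (0 < d) then d - 1 else d) = pvBump (cs.getD j ' ') d from rfl]
    rw [hcast, ih (j+1) (pvBump (cs.getD j ' ') d) (by omega) (fun i hi hlen => h i (by omega) hlen),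
        pvScanD_cons cs d hjlen hjm]

-- B's inner while computes exactly the depth scan up to m inclusive, leaving the cursor at m+1
lemma pvAdvanceDepth_eq (cs : List Char) (m : Nat) (hm : m < cs.length) :
    ∀ fuel c : Nat, ∀ d : Int, c + fuel = m + 1 →
      pvAdvanceDepth cs fuel (c : Int) (m : Int) d = (((m : Int) + 1), pvScanD cs c (m+1) d) := by
  intro fuel
  induction fuel with
  | zero =>
    intro c d hc
    have : c = m + 1 := by omega
    subst this
    rw [pvScanD_self]
    simp [pvAdvanceDepth]
  | succ fuel ih =>
    intro c d hc
    have hcle : (c : Int) ≤ (m : Int) := by exact_mod_cast (by omega : c ≤ m)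
    have hclen : c < cs.length := by omega
    have hget : PySem.List.pyGetD cs (c : Int) ' ' = cs.getD c ' ' := by
      simp [PySem.List.pyGetD_natCast]
    simp only [pvAdvanceDepth, if_pos hcle, hget]
    have hcast : (c : Int) + 1 = ((c + 1 : Nat) : Int) := by push_cast; ring
    rw [show (if cs.getD c ' ' == '(' then d + 1 else if cs.getD c ' ' == ')' && decide (0 < d) then d - 1 else d) = pvBump (cs.getD c ' ') d from rfl]
    rw [hcast, ih (c+1) (pvBump (cs.getD c ' ') d) (by omega)]
    rw [← pvScanD_cons cs d hclen (by omega)]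

-- one-step unfolding of A's loop when the guard idx < length holds
lemma pvFindLoop_succ (cs kwU : List Char) (fuel : Nat) (idx depth : Int) (h : idx < (cs.length : Int)) :
    pvFindLoop cs kwU (fuel + 1) idx depth =
      if pvBump (PySem.List.pyGetD cs idx ' ') depth == 0 &&
         (PySem.Chars.upper (PySem.List.slice cs (some idx) (some (idx + (kwU.length : Int)))) == kwU) then
        if !pvIsIdentifierChar (if 0 < idx then PySem.List.pyGetD cs (idx - 1) ' ' else ' ') &&
           !pvIsIdentifierChar (if idx + (kwU.length : Int) < (cs.length : Int) then PySem.List.pyGetD cs (idx + (kwU.length : Int)) ' ' else ' ')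
        then some idx
        else pvFindLoop cs kwU fuel (idx + 1) (pvBump (PySem.List.pyGetD cs idx ' ') depth)
      else pvFindLoop cs kwU fuel (idx + 1) (pvBump (PySem.List.pyGetD cs idx ' ') depth) := by
  conv_lhs => rw [pvFindLoop]
  rw [if_pos h]
  rfl

-- findFrom past the end of the string is -1 (Python's quirk, kept by PySem)
lemma pvFindFrom_past (us kwU : List Char) (p : Int) (h : (us.length : Int) < p) :
    PySem.Chars.findFrom us kwU p none = -1 := by
  simp [PySem.Chars.findFrom]
  exact fun h1 => absurd h1 (by omega)

-- main lemma: B's candidate-jumping loop equals A's character loop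
lemma pvMain (cs kwU : List Char) :
    ∀ fB : Nat, ∀ pos : Nat, ∀ d : Int, cs.length + 1 - pos < fB →
      pvScanLoop cs (PySem.Chars.upper cs) kwU (kwU.length : Int) fB (pos : Int) (pos : Int) d
        = pvFindLoop cs kwU (cs.length - pos + 1) (pos : Int) d := by
  intro fB
  induction fB with
  | zero => intro pos d h; omega
  | succ fB ih =>
    intro pos d hfB
    have hus : (PySem.Chars.upper cs).length = cs.length := by simp [PySem.Chars.upper]
    by_cases hpos : pos ≤ cs.length
    · have hk : pos ≤ (PySem.Chars.upper cs).length := by omega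
      by_cases hf : PySem.Chars.findFrom (PySem.Chars.upper cs) kwU (pos : Int) none = -1
      · -- no candidate left: both sides return none
        have hinf : ¬ kwU <:+: (PySem.Chars.upper cs).drop pos :=
          (PySem.Chars.findFrom_natCast_eq_neg_one_iff _ _ pos hk).mp hf
        have hA : pvFindLoop cs kwU (cs.length - pos + 1) (pos : Int) d = none :=
          pvFindLoop_none cs kwU _ _ d (by positivity)
            (fun i hi _ => pvNotOcc _ _ hinf (by exact_mod_cast hi))
        rw [hA]
        simp only [pvScanLoop, hf]
        norm_num
      · obtain ⟨hge, hpre, hmin⟩ := PySem.Chars.findFrom_natCast_spec (PySem.Chars.upper cs) kwU pos hk hf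
        set F := PySem.Chars.findFrom (PySem.Chars.upper cs) kwU (pos : Int) none with hF
        have heq := PySem.Chars.findFrom_natCast (PySem.Chars.upper cs) kwU pos hk
        have hle : F ≤ (cs.length : Int) := by
          rw [← hF] at heq
          rw [heq]
          split
          · omega
          · have h1 := PySem.Chars.find_le_length ((PySem.Chars.upper cs).drop pos) kwU
            rw [List.length_drop, hus] at h1
            omega
        have h0F : (0 : Int) ≤ F := le_trans (by positivity) hge
        have hjF : F = ((F.toNat : Nat) : Int) := by omega
        by_cases hend : cs.length ≤ F.toNat
        · -- candidate is the past-the-end match of the empty keyword: both sides none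
          have hA : pvFindLoop cs kwU (cs.length - pos + 1) (pos : Int) d = none := by
            refine pvFindLoop_none cs kwU _ _ d (by positivity) ?_
            intro i hi hlen
            exact hmin i (by exact_mod_cast hi) (by omega)
          rw [hA]
          simp only [pvScanLoop, ← hF]
          have hcond : (decide (F < 0) || decide ((cs.length : Int) ≤ F)) = true := by
            simp only [Bool.or_eq_true, decide_eq_true_eq]
            omega
          rw [hcond, if_pos rfl]
        · -- a real candidate at index j < length
          set j := F.toNat with hj
          have hjlen : j < cs.length := by omega
          have hposj : pos ≤ j := by omega
          have hltj : (j : Int) < (cs.length : Int) := by exact_mod_cast hjlen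
          have hget : PySem.List.pyGetD cs (j : Int) ' ' = cs.getD j ' ' := by
            simp [PySem.List.pyGetD_natCast]
          -- A: skip to j with only the depth updated
          rw [pvFindLoop_skip cs kwU j (le_of_lt hjlen) (j - pos) pos d (by omega) hmin]
          -- B: the guard is false, the inner while lands on (j+1, scan pos (j+1) d)
          simp only [pvScanLoop, ← hF]
          have hcond : (decide (F < 0) || decide ((cs.length : Int) ≤ F)) = false := by
            simp only [Bool.or_eq_false_iff, decide_eq_false_iff_not]
            omega
          rw [hcond, if_neg (by simp), hjF]
          have hadv : pvAdvanceDepth cs ((j : Int) + 1 - (pos : Int)).toNat (pos : Int) (j : Int) d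
              = (((j : Int) + 1), pvScanD cs pos (j+1) d) := by
            rw [show ((j : Int) + 1 - (pos : Int)).toNat = j + 1 - pos by omega]
            exact pvAdvanceDepth_eq cs j hjlen (j + 1 - pos) pos d (by omega)
          rw [hadv]
          dsimp only
          -- A: one step at j
          have ht : ((PySem.Chars.upper (PySem.List.slice cs (some (j:Int)) (some ((j:Int) + (kwU.length : Int)))) == kwU)) = true := by
            rw [pvTest_iff]
            exact hpre
          rw [show cs.length - j + 1 = (cs.length - (j+1) + 1) + 1 by omega]
          rw [pvFindLoop_succ cs kwU _ _ _ hltj, hget, ← pvScanD_snoc cs d hjlen hposj,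
              ht, Bool.and_true]
          simp only [pvIsIdentifierChar, pvIdentB]
          have hrec : pvScanLoop cs (PySem.Chars.upper cs) kwU (kwU.length : Int) fB ((j:Int) + 1) ((j:Int) + 1) (pvScanD cs pos (j+1) d)
              = pvFindLoop cs kwU (cs.length - (j+1) + 1) ((j:Int) + 1) (pvScanD cs pos (j+1) d) := by
            rw [show (j : Int) + 1 = ((j + 1 : Nat) : Int) by push_cast; ring]
            exact ih (j+1) (pvScanD cs pos (j+1) d) (by omega)
          rw [hrec]
          rfl
    · -- pos is past the end: find's quirk gives -1, and A's loop guard fails at once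
      have hfind : PySem.Chars.findFrom (PySem.Chars.upper cs) kwU (pos : Int) none = -1 :=
        pvFindFrom_past _ _ _ (by rw [hus]; exact_mod_cast (by omega : cs.length < pos))
      have hA : ¬ ((pos : Int) < (cs.length : Int)) := by exact_mod_cast (by omega : ¬ pos < cs.length)
      simp only [pvScanLoop, hfind]
      rw [show cs.length - pos + 1 = 0 + 1 by omega]
      simp only [pvFindLoop, if_neg hA]
      norm_num

-- ===== VERDICT (by name: the statement is the Claim_ definition above) =====
theorem find_top_level_keyword_py_spec : Claim_equal_find_top_level_keyword_py := by
  intro cleaned keyword start hdom hpre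
  unfold Spec_find_top_level_keyword_py
  unfold Pre_find_top_level_keyword_py at hpre
  lift start to ℕ using hpre with s
  unfold find_top_level_keyword_py find_top_level_keyword_py_alt
  have h1 : ((cleaned.toList.length : Int) - (s : Int)).toNat + 1 = cleaned.toList.length - s + 1 := by omega
  have h2 : cleaned.toList.length + 1 - s < ((cleaned.toList.length : Int) + 1 - (s : Int)).toNat + 1 := by omega
  rw [h1]
  exact (pvMain cleaned.toList (PySem.Chars.upper keyword.toList) _ s 0 h2).symm
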